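-- pv_equiv track=rewrite | github.com/eross-uwp/Server | bayesian_network/bayesian_network/graph_builder.py | get_parent_names
-- ===== SOURCE A (Python) =====
-- def get_parent_names(relation):
--     """
--     This method will pull out the class names that are in the logical statement and return a list of the names.
--     resources: https://www.journaldev.com/23689/python-string-append
--     :param relation: String
--     :return: list
--     """
--     parents = []
--     for i in range(0, len(relation)):
--         if relation[i] == '{':
--             name = []
--             for j in range(i + 1, len(relation)):
--                 if relation[j] != '#':
--                     name.append(relation[j])
--                 else:
--                     i = j
--                     break
--             parents.append(''.join(name))
--     return parents
-- ===== SOURCE B (Python) =====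
-- def get_parent_names(relation):
--     n = len(relation)
--     # suffix table: next_hash[i] = index of the first '#' at position >= i, or n if none
--     next_hash = [n] * (n + 1)
--     for i in range(n - 1, -1, -1):
--         next_hash[i] = i if relation[i] == '#' else next_hash[i + 1]
--     parents = []
--     for i, ch in enumerate(relation):
--         if ch == '{':
--             parents.append(relation[i + 1:next_hash[i + 1]])
--     return parents
-- ===== Notes on version B (the rewrite author's own statement) =====
-- stated objective: alternative
-- what changed: Replaces the nested forward rescan after every '{' with one backward pass building a next-'#' suffix table plus a single slice per '{'; it trades A's per-'{' rescans for an always-built table.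
import Mathlib
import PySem

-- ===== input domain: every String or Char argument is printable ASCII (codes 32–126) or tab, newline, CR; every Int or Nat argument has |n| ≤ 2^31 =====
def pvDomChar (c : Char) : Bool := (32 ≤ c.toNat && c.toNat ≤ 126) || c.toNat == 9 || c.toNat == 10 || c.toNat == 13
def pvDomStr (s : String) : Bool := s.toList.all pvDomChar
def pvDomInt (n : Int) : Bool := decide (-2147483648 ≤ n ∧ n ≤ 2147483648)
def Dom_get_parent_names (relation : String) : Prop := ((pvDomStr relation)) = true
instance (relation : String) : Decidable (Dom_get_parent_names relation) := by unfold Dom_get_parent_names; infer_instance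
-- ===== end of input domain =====

-- B replaces A's nested forward rescan after each '{' by one backward pass building a
-- next-'#' suffix table plus a single slice per '{' (alternative decomposition, similar cost).


-- ===== PORT A =====
-- inner loop: for j in range(i+1, len): if relation[j] != '#': name.append(relation[j]) else: break
def pvAInner (cs : List Char) (j : Nat) : List Char :=
  if h : j < cs.length then
    if cs[j] ≠ '#' then cs[j] :: pvAInner cs (j + 1) else []
  else []
termination_by cs.length - j

def get_parent_names (relation : String) : List String :=
  let cs := relation.toList
  (List.range cs.length).foldl
    (fun parents i =>
      if cs.getD i ' ' = '{' then parents ++ [String.ofList (pvAInner cs (i + 1))] else parents)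
    []

-- ===== PORT B =====
-- suffix table built back-to-front: entry for index i is i if cs[i] = '#' else the entry for i+1;
-- the extra final entry is the sentinel len
def pvNext (cs : List Char) (i len : Nat) : List Nat :=
  match cs with
  | [] => [len]
  | c :: rest =>
    let t := pvNext rest (i + 1) len
    (if c = '#' then i else t.headD len) :: t

def get_parent_names_alt (relation : String) : List String :=
  let cs := relation.toList
  let n := cs.length
  let nh := pvNext cs 0 n
  (PySem.List.enumerate cs).foldl
    (fun parents p =>
      if p.2 = '{' then
        parents ++ [String.ofList ((cs.drop (p.1.toNat + 1)).take (nh.getD (p.1.toNat + 1) n - (p.1.toNat + 1)))]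
      else parents)
    []

-- ===== PRECONDITION & SPEC =====
def Spec_get_parent_names (relation : String) (out : List String) : Prop := out = get_parent_names_alt relation
instance (relation : String) (out : List String) : Decidable (Spec_get_parent_names relation out) := by unfold Spec_get_parent_names; infer_instance

-- ===== CLAIM (what is proved, stated in full; the proofs are below) =====
def Claim_equal_get_parent_names : Prop := ∀ (relation : String), Dom_get_parent_names relation → Spec_get_parent_names relation (get_parent_names relation)

-- ===== LEMMAS AND PROOFS =====

lemma pvAInner_eq_takeWhile (cs : List Char) (j : Nat) :
    pvAInner cs j = (cs.drop j).takeWhile (· ≠ '#') := by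
  fun_induction pvAInner cs j with
  | case1 j h hne ih =>
    rw [List.drop_eq_getElem_cons h, List.takeWhile_cons, ih]
    simp [hne]
  | case2 j h hne =>
    rw [List.drop_eq_getElem_cons h, List.takeWhile_cons]
    simp at hne
    simp [hne]
  | case3 j h =>
    rw [List.drop_eq_nil_of_le (by omega)]
    simp

-- reference form of the table entry for a suffix starting at absolute position p
def pvNextSpec (l : List Char) (p len : Nat) : Nat :=
  match l with
  | [] => len
  | c :: r => if c = '#' then p else pvNextSpec r (p + 1) len

lemma pvNext_ne_nil (cs : List Char) (i len : Nat) : pvNext cs i len ≠ [] := by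
  cases cs <;> simp [pvNext]

lemma pvNext_getD (cs : List Char) (i len k : Nat) (hk : k ≤ cs.length) :
    (pvNext cs i len).getD k len = pvNextSpec (cs.drop k) (i + k) len := by
  induction cs generalizing i k with
  | nil =>
    have : k = 0 := by simpa using hk
    subst this
    simp [pvNext, pvNextSpec]
  | cons c rest ih =>
    cases k with
    | zero =>
      simp only [pvNext, pvNextSpec, List.drop_zero, List.getD_cons_zero]
      rcases eq_or_ne c '#' with hc | hc
      · simp [hc]
      · have h0 := ih (i + 1) 0 (by omega)
        simp only [List.drop_zero, Nat.add_zero] at h0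
        cases hrec : pvNext rest (i + 1) len with
        | nil => exact absurd hrec (pvNext_ne_nil rest (i + 1) len)
        | cons x t =>
          rw [hrec] at h0
          simp only [List.getD_cons_zero] at h0
          simp [hc, h0]
    | succ k' =>
      simp only [pvNext, List.getD_cons_succ, List.drop_succ_cons]
      rw [ih (i + 1) k' (by simpa using hk)]
      ring_nf

lemma pvNextSpec_ge (l : List Char) (p len : Nat) (h : p + l.length = len) :
    p ≤ pvNextSpec l p len := by
  induction l generalizing p with
  | nil => simp only [pvNextSpec]; simp at h; omega
  | cons c r ih =>
    simp only [pvNextSpec]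
    split
    · exact le_refl _
    · have hlen : (p + 1) + r.length = len := by simp at h; omega
      have := ih (p + 1) hlen
      omega

lemma take_pvNextSpec (l : List Char) (p len : Nat) (h : p + l.length = len) :
    l.take (pvNextSpec l p len - p) = l.takeWhile (· ≠ '#') := by
  induction l generalizing p with
  | nil => simp
  | cons c r ih =>
    simp only [pvNextSpec, List.takeWhile_cons]
    rcases eq_or_ne c '#' with hc | hc
    · simp [hc]
    · have hlen : (p + 1) + r.length = len := by simp at h; omega
      have hge := pvNextSpec_ge r (p + 1) len hlen
      have hs : pvNextSpec r (p + 1) len - p = (pvNextSpec r (p + 1) len - (p + 1)) + 1 := by omega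
      simp [hc, hs, List.take_succ_cons, ih (p + 1) hlen]

-- generic append-if fold with a Prop test
lemma pvFoldlAppIf {α β : Type} (l : List α) (p : α → Prop) [DecidablePred p] (f : α → β)
    (acc : List β) :
    l.foldl (fun a x => if p x then a ++ [f x] else a) acc
      = acc ++ (l.filter (fun x => decide (p x))).map f := by
  induction l generalizing acc with
  | nil => simp
  | cons x xs ih =>
    simp only [List.foldl_cons, List.filter_cons]
    by_cases hx : p x <;> simp [hx, ih]

lemma pvEnumerate_eq (cs : List Char) :
    PySem.List.enumerate cs = (List.range cs.length).map (fun (k : Nat) => ((k : Int), cs.getD k ' ')) := by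
  rw [PySem.List.enumerate_eq_map_pyRange cs ' ']
  simp only [PySem.List.len_eq, PySem.List.pyRange_zero_natCast, List.map_map]
  simp

lemma pvMain (cs : List Char) :
    (List.range cs.length).foldl
      (fun parents i =>
        if cs.getD i ' ' = '{' then parents ++ [String.ofList (pvAInner cs (i + 1))] else parents) []
  = (PySem.List.enumerate cs).foldl
      (fun parents p =>
        if p.2 = '{' then
          parents ++ [String.ofList ((cs.drop (p.1.toNat + 1)).take
            ((pvNext cs 0 cs.length).getD (p.1.toNat + 1) cs.length - (p.1.toNat + 1)))]
        else parents) [] := by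
  rw [pvEnumerate_eq]
  simp only [List.foldl_map, Int.toNat_natCast]
  rw [pvFoldlAppIf (List.range cs.length) (fun i => cs.getD i ' ' = '{')
      (fun i => String.ofList (pvAInner cs (i + 1)))]
  rw [pvFoldlAppIf (List.range cs.length) (fun k => cs.getD k ' ' = '{')
      (fun k => String.ofList ((cs.drop (k + 1)).take
        ((pvNext cs 0 cs.length).getD (k + 1) cs.length - (k + 1))))]
  apply congrArg
  apply List.map_congr_left
  intro k hk
  simp only [List.mem_filter, List.mem_range, decide_eq_true_eq] at hk
  obtain ⟨hklt, _⟩ := hk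
  congr 1
  rw [pvAInner_eq_takeWhile, pvNext_getD cs 0 cs.length (k + 1) (by omega)]
  simp only [Nat.zero_add]
  rw [take_pvNextSpec (cs.drop (k + 1)) (k + 1) cs.length (by simp; omega)]

-- ===== VERDICT (by name: the statement is the Claim_ definition above) =====
theorem get_parent_names_spec : Claim_equal_get_parent_names := by
  intro relation _
  unfold Spec_get_parent_names get_parent_names get_parent_names_alt
  exact pvMain relation.toList
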